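-- pv_equiv track=rewrite | github.com/nighthawk6389/SynopticSpread | backend/app/services/scheduler.py | _compute_divergence_hours
-- ===== SOURCE A (Python) =====
-- def _compute_divergence_hours(
--     all_model_data: dict[str, dict[int, object]],
-- ) -> set[int]:
--     """Return lead hours covered by at least two models.
--
--     Uses the *union* of every model's lead hours, then filters to those
--     where at least two models have data.  This ensures that, e.g.,
--     GFS-NAM divergence at fhr 54-72 is kept even though HRRR only
--     goes to 48 h.
--     """
--     all_hours: set[int] = set()
--     for d in all_model_data.values():
--         all_hours |= set(d.keys())
--     return {
--         h for h in all_hours if sum(1 for d in all_model_data.values() if h in d) >= 2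
--     }
-- ===== SOURCE B (Python) =====
-- def _compute_divergence_hours(
--     all_model_data: dict[str, dict[int, object]],
-- ) -> set[int]:
--     """Return lead hours covered by at least two models.
--
--     Single pass: count, per lead hour, how many models carry it, then
--     keep the hours whose count is at least two.
--     """
--     counts: dict[int, int] = {}
--     for d in all_model_data.values():
--         for h in d:
--             counts[h] = counts.get(h, 0) + 1
--     return {h for h in counts if counts[h] >= 2}
-- ===== Notes on version B (the rewrite author's own statement) =====
-- stated objective: faster
-- what changed: Replaces A's union-of-key-sets followed by a rescan of every model per candidate hour with a single counting pass (hour -> number of models) and a final filter on the counter.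
import Mathlib
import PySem

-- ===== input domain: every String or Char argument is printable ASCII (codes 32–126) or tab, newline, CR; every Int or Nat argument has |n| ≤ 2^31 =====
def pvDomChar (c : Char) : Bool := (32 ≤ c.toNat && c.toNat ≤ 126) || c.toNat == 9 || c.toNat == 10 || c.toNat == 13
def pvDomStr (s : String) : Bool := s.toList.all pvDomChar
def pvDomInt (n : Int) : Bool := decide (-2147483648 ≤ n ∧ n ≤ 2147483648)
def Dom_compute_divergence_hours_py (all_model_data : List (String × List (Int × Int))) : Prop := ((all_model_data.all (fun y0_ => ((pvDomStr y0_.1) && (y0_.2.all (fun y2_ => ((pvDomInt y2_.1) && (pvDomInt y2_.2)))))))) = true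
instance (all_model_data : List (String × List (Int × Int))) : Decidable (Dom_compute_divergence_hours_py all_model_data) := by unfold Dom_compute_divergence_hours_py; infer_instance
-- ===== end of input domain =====

-- B replaces A's union-of-key-sets plus a rescan of every model per candidate hour with one
-- counting pass (hour -> number of models carrying it) and a final filter (objective: faster).

-- ===== PORT A =====
def compute_divergence_hours_py (all_model_data : List (String × List (Int × Int))) : List Int :=
  -- the argument is a Python dict: .values() after duplicate-key collapse (last value wins)
  let vals := (PySem.Dict.ofList all_model_data).values
  -- all_hours = set(); for d in vals: all_hours |= set(d.keys())
  -- (set() absorbs the inner dict's key dedup, so 'd.map Prod.fst' is exact here)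
  let all_hours : PySem.Set Int :=
    vals.foldl (fun s d => PySem.Set.union s (PySem.Set.ofList (d.map Prod.fst))) PySem.Set.empty
  -- {h for h in all_hours if sum(1 for d in vals if h in d) >= 2}
  -- ('h in d' is membership among the inner dict's keys, unaffected by key duplicates)
  all_hours.filter (fun h =>
    decide (2 ≤ (vals.map (fun d => if (d.map Prod.fst).contains h then (1 : Int) else 0)).sum))

-- ===== PORT B =====
def compute_divergence_hours_py_alt (all_model_data : List (String × List (Int × Int))) : List Int :=
  let vals := (PySem.Dict.ofList all_model_data).values
  -- counts = {}; for d in vals: for h in d: counts[h] = counts.get(h, 0) + 1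
  -- ('for h in d' iterates the inner dict's distinct keys in first-insertion order = dedup)
  let counts : PySem.Dict Int Int :=
    vals.foldl (fun c d => (PySem.List.dedup (d.map Prod.fst)).foldl
      (fun c h => c.insert h (c.getD h 0 + 1)) c) PySem.Dict.empty
  -- {h for h in counts if counts[h] >= 2}  (counts[h] never raises: h is a key of counts)
  PySem.Set.ofList (counts.keys.filter (fun h => decide (2 ≤ counts.getD h 0)))

-- ===== PRECONDITION & SPEC =====
def Spec_compute_divergence_hours_py (all_model_data : List (String × List (Int × Int))) (out : List Int) : Prop := out = compute_divergence_hours_py_alt all_model_data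
instance (all_model_data : List (String × List (Int × Int))) (out : List Int) : Decidable (Spec_compute_divergence_hours_py all_model_data out) := by unfold Spec_compute_divergence_hours_py; infer_instance

-- ===== CLAIM (what is proved, stated in full; the proofs are below) =====
def Claim_equal_compute_divergence_hours_py : Prop := ∀ (all_model_data : List (String × List (Int × Int))), Dom_compute_divergence_hours_py all_model_data → Spec_compute_divergence_hours_py all_model_data (compute_divergence_hours_py all_model_data)

-- ===== LEMMAS AND PROOFS =====

-- the multiset of (per-model distinct) hours, flattened in model order
def pvFlatHours (vals : List (List (Int × Int))) : List Int :=
  vals.flatMap (fun d => PySem.List.dedup (d.map Prod.fst))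

-- a loop over the models running an inner loop over each model's keys is the loop over the flattened keys
theorem pv_foldl_flatMap {α β γ : Type} (f : β → α → β) (g : γ → List α)
    (vals : List γ) (init : β) :
    vals.foldl (fun c d => (g d).foldl f c) init = (vals.flatMap g).foldl f init := by
  induction vals generalizing init with
  | nil => rfl
  | cons d t ih => simp [List.flatMap_cons, List.foldl_append, ih]

-- A's all_hours accumulator is set(flattened hours)
theorem pv_all_hours_eq (vals : List (List (Int × Int))) :
    vals.foldl (fun s d => PySem.Set.union s (PySem.Set.ofList (d.map Prod.fst)))
      PySem.Set.empty = PySem.Set.ofList (pvFlatHours vals) := by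
  have h1 : ∀ (s : PySem.Set Int) (d : List (Int × Int)),
      PySem.Set.union s (PySem.Set.ofList (d.map Prod.fst))
        = (PySem.List.dedup (d.map Prod.fst)).foldl PySem.Set.add s := by
    intro s d
    rw [PySem.List.dedup_eq_ofList]
    rfl
  simp only [h1]
  rw [pv_foldl_flatMap PySem.Set.add (fun d => PySem.List.dedup (d.map Prod.fst)) vals PySem.Set.empty]
  exact (PySem.Set.ofList_eq_foldl _).symm

-- the count of an hour in the flattened keys is A's 0/1 sum over the models
theorem pv_count_eq_sum (vals : List (List (Int × Int))) (h : Int) :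
    ((pvFlatHours vals).count h : Int)
      = (vals.map (fun d => if (d.map Prod.fst).contains h then (1 : Int) else 0)).sum := by
  induction vals with
  | nil => simp [pvFlatHours]
  | cons d t ih =>
    have hc : (PySem.List.dedup (d.map Prod.fst)).count h
        = if (d.map Prod.fst).contains h then 1 else 0 := by
      rw [List.Nodup.count (PySem.List.nodup_dedup _)]
      have hmem : h ∈ PySem.List.dedup (d.map Prod.fst) ↔ (d.map Prod.fst).contains h = true := by
        rw [PySem.List.mem_dedup]
        exact List.contains_iff_mem.symm
      exact if_congr hmem rfl rfl
    simp only [pvFlatHours, List.flatMap_cons, List.count_append, List.map_cons, List.sum_cons]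
    rw [hc]
    push_cast
    rw [← ih]
    split <;> simp [pvFlatHours]

theorem compute_divergence_hours_eq (all_model_data : List (String × List (Int × Int))) :
    compute_divergence_hours_py all_model_data
      = compute_divergence_hours_py_alt all_model_data := by
  unfold compute_divergence_hours_py compute_divergence_hours_py_alt
  simp only []
  set vals := (PySem.Dict.ofList all_model_data).values with hv
  -- B's counter is Counter(flattened hours)
  have hcnt : vals.foldl (fun c d => (PySem.List.dedup (d.map Prod.fst)).foldl
        (fun c h => c.insert h (c.getD h 0 + 1)) c) PySem.Dict.empty
      = PySem.Dict.counter (pvFlatHours vals) := by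
    rw [pv_foldl_flatMap (fun c h => PySem.Dict.insert c h (c.getD h 0 + 1))
      (fun d => PySem.List.dedup (d.map Prod.fst)) vals PySem.Dict.empty]
    exact PySem.Dict.foldl_insert_getD_add_one_eq_counter _
  rw [hcnt, pv_all_hours_eq vals, PySem.Dict.keys_counter]
  -- B re-wraps an already-duplicate-free list with set()
  rw [PySem.Set.ofList_eq_self_of_nodup _ ((PySem.Set.nodup_ofList _).filter _)]
  -- both sides filter set(flattened hours); the predicates agree pointwise
  apply List.filter_congr
  intro h _
  simp only [PySem.Dict.getD_counter]
  rw [← pv_count_eq_sum vals h]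

-- ===== VERDICT (by name: the statement is the Claim_ definition above) =====
theorem compute_divergence_hours_py_spec : Claim_equal_compute_divergence_hours_py := by
  intro amd _
  exact compute_divergence_hours_eq amd
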